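-- pv_equiv track=rewrite | github.com/sarahekaireb/CSE237D_Rock_Climbing_Coach | src/utils/pc_complete_utils.py | get_holds_used
-- ===== SOURCE A (Python) =====
-- def joint_in_hold(joint, hold):
--     # joint is (x, y)
--     # hold is [(x_min, y_min), (x_max, y_max)]
--     jx, jy = joint
--     h_xmin, h_ymin = hold[0]
--     h_xmax, h_ymax = hold[1]
--
--     if jx <= h_xmax and jx >= h_xmin and jy <= h_ymax and jy >= h_ymin:
--         return True
--     else:
--         return False
--
-- def get_holds_used(holds, dict_coordinates):
--     # should return a list of lists
--     # nested list should be an array of True/False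
--     # each index of the nested list will correspond
--     # to the hold at that index in holds
--     joint_list = list(zip(dict_coordinates['left_hand'], dict_coordinates['right_hand'], dict_coordinates['left_leg'], dict_coordinates['right_leg']))
--     holds_used = []
--     for i in range(len(joint_list)): # frames
--         used_arr = []
--         for h in range(len(holds)):
--             hold = holds[h]
--             joint_usage = [joint_in_hold(joint, hold) for joint in joint_list[i]]
--             if sum(joint_usage) >= 1:
--                 try: # checking if next frame also uses same hold
--                     next_joint_usage = [joint_in_hold(joint, hold) for joint in joint_list[i+1]]
--                     if sum(next_joint_usage) >= 1:
--                         used_arr.append(True)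
--                     else:
--                         used_arr.append(False)
--                 except:
--                     used_arr.append(True)
--             else:
--                 used_arr.append(False)
--         holds_used.append(used_arr)
--     return holds_used
-- ===== SOURCE B (Python) =====
-- def _in_hold(joint, hold):
--     (xmin, ymin), (xmax, ymax) = hold[0], hold[1]
--     x, y = joint
--     return xmin <= x <= xmax and ymin <= y <= ymax
--
-- def get_holds_used(holds, dict_coordinates):
--     frames = list(zip(dict_coordinates['left_hand'], dict_coordinates['right_hand'],
--                       dict_coordinates['left_leg'], dict_coordinates['right_leg']))
--     # pass 1: any_used[i][h] = some joint of frame i lies in holds[h]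
--     any_used = [[any(_in_hold(j, hold) for j in fr) for hold in holds] for fr in frames]
--     # pass 2: combine each row with the next row (last frame keeps its own row)
--     out = []
--     for i, row in enumerate(any_used):
--         if i + 1 < len(any_used):
--             out.append([a and b for a, b in zip(row, any_used[i + 1])])
--         else:
--             out.append(row)
--     return out
-- ===== Notes on version B (the rewrite author's own statement) =====
-- stated objective: alternative
-- what changed: Replaces the inline per-hold recomputation with a try/except boundary by a two-pass structure: first build a table any_used[i][h] (any joint of frame i in hold h), then combine each row with the next row (the last frame keeps its own row), so each frame's containment tests are computed once instead of twice.
import Mathlib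
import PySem

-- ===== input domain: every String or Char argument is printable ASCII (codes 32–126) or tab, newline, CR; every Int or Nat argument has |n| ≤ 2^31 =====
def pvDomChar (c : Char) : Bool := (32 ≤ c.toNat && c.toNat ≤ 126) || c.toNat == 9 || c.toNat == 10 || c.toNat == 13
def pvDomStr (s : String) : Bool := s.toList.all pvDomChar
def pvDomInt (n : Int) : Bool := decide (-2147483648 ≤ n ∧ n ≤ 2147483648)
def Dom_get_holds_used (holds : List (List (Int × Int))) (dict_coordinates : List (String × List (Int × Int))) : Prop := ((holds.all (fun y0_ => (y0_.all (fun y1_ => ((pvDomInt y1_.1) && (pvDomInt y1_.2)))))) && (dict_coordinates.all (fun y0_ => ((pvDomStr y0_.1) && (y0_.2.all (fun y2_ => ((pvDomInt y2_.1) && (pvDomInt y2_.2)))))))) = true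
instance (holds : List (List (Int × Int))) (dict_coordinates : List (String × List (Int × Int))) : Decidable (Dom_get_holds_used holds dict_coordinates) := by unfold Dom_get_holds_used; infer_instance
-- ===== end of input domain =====

-- B replaces A's inline next-frame recomputation (with its try/except boundary) by a
-- two-pass table-then-combine structure of the same cost (objective: alternative).


-- ===== PORT A =====
-- zip of the four per-joint coordinate lists: frame i is the list of its four joints
-- (Python's 4-tuple from zip, ported as a 4-element list; length = min of the four lengths)
def pvZip4 (a b c d : List (Int × Int)) : List (List (Int × Int)) :=
  match a, b, c, d with
  | x :: a, y :: b, z :: c, w :: d => [x, y, z, w] :: pvZip4 a b c d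
  | _, _, _, _ => []

-- hold[0]/hold[1]: Pre_ guarantees length ≥ 2 whenever this is reached, so getD is exact there
def joint_in_hold (joint : Int × Int) (hold : List (Int × Int)) : Bool :=
  let jx := joint.1
  let jy := joint.2
  let p0 := (PySem.List.pyGet? hold 0).getD (0, 0)
  let p1 := (PySem.List.pyGet? hold 1).getD (0, 0)
  if jx ≤ p1.1 ∧ jx ≥ p0.1 ∧ jy ≤ p1.2 ∧ jy ≥ p0.2 then true else false

def get_holds_used (holds : List (List (Int × Int))) (dict_coordinates : List (String × List (Int × Int))) : List (List Bool) :=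
  let d := PySem.Dict.mk dict_coordinates
  let joint_list := pvZip4 (d.getD "left_hand" []) (d.getD "right_hand" [])
    (d.getD "left_leg" []) (d.getD "right_leg" [])
  (PySem.List.pyRange 0 joint_list.length 1).map (fun i =>
    holds.map (fun hold =>
      let joint_usage := (PySem.List.pyGetD joint_list i []).map (fun j => joint_in_hold j hold)
      if joint_usage.count true ≥ 1 then
        -- try: joint_list[i+1]; except (IndexError at the last frame) → True
        match PySem.List.pyGet? joint_list (i + 1) with
        | some nf =>
          let next_joint_usage := nf.map (fun j => joint_in_hold j hold)
          if next_joint_usage.count true ≥ 1 then true else false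
        | none => true
      else false))

-- ===== PORT B =====
def pvInHold (j : Int × Int) (hold : List (Int × Int)) : Bool :=
  let lo := (PySem.List.pyGet? hold 0).getD (0, 0)
  let hi := (PySem.List.pyGet? hold 1).getD (0, 0)
  decide (lo.1 ≤ j.1 ∧ j.1 ≤ hi.1 ∧ lo.2 ≤ j.2 ∧ j.2 ≤ hi.2)

def get_holds_used_alt (holds : List (List (Int × Int))) (dict_coordinates : List (String × List (Int × Int))) : List (List Bool) :=
  let d := PySem.Dict.mk dict_coordinates
  let frames := pvZip4 (d.getD "left_hand" []) (d.getD "right_hand" [])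
    (d.getD "left_leg" []) (d.getD "right_leg" [])
  let any_used := frames.map (fun fr => holds.map (fun hold => fr.any (fun j => pvInHold j hold)))
  (PySem.List.enumerate any_used).map (fun p =>
    if p.1 + 1 < (any_used.length : Int) then
      List.zipWith (fun a b => a && b) p.2 (PySem.List.pyGetD any_used (p.1 + 1) [])
    else p.2)

-- ===== PRECONDITION & SPEC =====
-- Pre_ excludes exactly the inputs where the Python A raises: a missing joint key (KeyError),
-- or a hold with fewer than two corners while at least one frame exists (IndexError).
def Pre_get_holds_used (holds : List (List (Int × Int))) (dict_coordinates : List (String × List (Int × Int))) : Prop :=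
  ((PySem.Dict.mk dict_coordinates).get? "left_hand").isSome ∧
  ((PySem.Dict.mk dict_coordinates).get? "right_hand").isSome ∧
  ((PySem.Dict.mk dict_coordinates).get? "left_leg").isSome ∧
  ((PySem.Dict.mk dict_coordinates).get? "right_leg").isSome ∧
  (min (min ((PySem.Dict.mk dict_coordinates).getD "left_hand" []).length ((PySem.Dict.mk dict_coordinates).getD "right_hand" []).length)
     (min ((PySem.Dict.mk dict_coordinates).getD "left_leg" []).length ((PySem.Dict.mk dict_coordinates).getD "right_leg" []).length) = 0
   ∨ ∀ h ∈ holds, 2 ≤ h.length)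
instance (holds : List (List (Int × Int))) (dict_coordinates : List (String × List (Int × Int))) : Decidable (Pre_get_holds_used holds dict_coordinates) := by unfold Pre_get_holds_used; infer_instance

def pvWitness_get_holds_used : (List (List (Int × Int))) × (List (String × List (Int × Int))) :=
  ([[(0, 0), (2, 2)]],
   [("left_hand", [(1, 1), (5, 5)]), ("right_hand", [(4, 4), (1, 1)]),
    ("left_leg", [(0, 0), (9, 9)]), ("right_leg", [(3, 3), (0, 1)])])

def Spec_get_holds_used (holds : List (List (Int × Int))) (dict_coordinates : List (String × List (Int × Int))) (out : List (List Bool)) : Prop := out = get_holds_used_alt holds dict_coordinates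
instance (holds : List (List (Int × Int))) (dict_coordinates : List (String × List (Int × Int))) (out : List (List Bool)) : Decidable (Spec_get_holds_used holds dict_coordinates out) := by unfold Spec_get_holds_used; infer_instance

-- ===== CLAIM (what is proved, stated in full; the proofs are below) =====
def Claim_equal_get_holds_used : Prop := ∀ (holds : List (List (Int × Int))) (dict_coordinates : List (String × List (Int × Int))), Dom_get_holds_used holds dict_coordinates → Pre_get_holds_used holds dict_coordinates → Spec_get_holds_used holds dict_coordinates (get_holds_used holds dict_coordinates)

-- ===== LEMMAS AND PROOFS =====
theorem pvInHold_eq_joint_in_hold (j : Int × Int) (hold : List (Int × Int)) :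
    pvInHold j hold = joint_in_hold j hold := by
  unfold pvInHold joint_in_hold
  rw [Bool.eq_iff_iff]
  simp
  omega

theorem any_eq_count (fr : List (Int × Int)) (hold : List (Int × Int)) :
    fr.any (fun j => pvInHold j hold) =
      ((fr.map (fun j => joint_in_hold j hold)).count true ≥ 1 : Bool) := by
  simp only [pvInHold_eq_joint_in_hold, ge_iff_le, Nat.one_le_iff_ne_zero, ← Nat.pos_iff_ne_zero]
  rw [Bool.eq_iff_iff]
  simp [List.count_pos_iff, List.any_eq_true]

theorem zipWith_map_map {α β : Type} (f : β → β → β) (g h : α → β) (l : List α) :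
    List.zipWith f (l.map g) (l.map h) = l.map (fun x => f (g x) (h x)) := by
  induction l with
  | nil => rfl
  | cons x xs ih => simp [ih]

theorem ports_eq (holds : List (List (Int × Int))) (dict_coordinates : List (String × List (Int × Int))) :
    get_holds_used holds dict_coordinates = get_holds_used_alt holds dict_coordinates := by
  unfold get_holds_used get_holds_used_alt
  dsimp only
  set dd := PySem.Dict.mk dict_coordinates with hdd
  set jl := pvZip4 (dd.getD "left_hand" []) (dd.getD "right_hand" [])
    (dd.getD "left_leg" []) (dd.getD "right_leg" []) with hjl
  set g := fun (fr : List (Int × Int)) => holds.map (fun hold => fr.any (fun j => pvInHold j hold)) with hg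
  rw [PySem.List.enumerate_eq_map_pyRange _ ([] : List Bool)]
  simp only [List.map_map, List.length_map, PySem.List.len]
  apply List.map_congr_left
  intro i hi
  rw [PySem.List.mem_pyRange_one] at hi
  obtain ⟨hi0, hin⟩ := hi
  have hk : i.toNat < jl.length := by omega
  have hgetj : PySem.List.pyGetD jl i [] = jl[i.toNat] :=
    PySem.List.pyGetD_eq_getElem _ _ hi0 hin
  have hgeta : PySem.List.pyGetD (jl.map g) i [] = g jl[i.toNat] := by
    rw [PySem.List.pyGetD_eq_getElem _ _ hi0 (by simpa using hin)]
    simp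
  simp only [Function.comp]
  rw [hgeta, hgetj]
  by_cases hnext : i + 1 < (jl.length : Int)
  · have hk1 : (i + 1).toNat < jl.length := by omega
    have h2 : PySem.List.pyGet? jl (i + 1) = some jl[(i+1).toNat] :=
      PySem.List.pyGet?_eq_some_getElem _ (by omega) hnext
    have h3 : PySem.List.pyGetD (jl.map g) (i + 1) [] = g jl[(i+1).toNat] := by
      rw [PySem.List.pyGetD_eq_getElem _ _ (by omega) (by simpa using hnext)]
      simp
    rw [if_pos hnext, h2, h3]
    simp only [hg]
    rw [zipWith_map_map]
    apply List.map_congr_left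
    intro hold _
    rw [any_eq_count, any_eq_count]
    by_cases hc : (jl[i.toNat].map (fun j => joint_in_hold j hold)).count true ≥ 1 <;>
      by_cases hn : ((jl[(i+1).toNat]).map (fun j => joint_in_hold j hold)).count true ≥ 1 <;>
      simp [hc, hn]
  · have h2 : PySem.List.pyGet? jl (i + 1) = none := by
      rw [PySem.List.pyGet?_eq_none_iff]
      intro hr
      unfold PySem.Raise.InRange at hr
      omega
    rw [if_neg hnext, h2]
    simp only [hg]
    apply List.map_congr_left
    intro hold _
    rw [any_eq_count]
    by_cases hc : (jl[i.toNat].map (fun j => joint_in_hold j hold)).count true ≥ 1 <;> simp [hc]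

-- ===== VERDICT (by name: the statement is the Claim_ definition above) =====
theorem get_holds_used_spec : Claim_equal_get_holds_used := by
  intro holds dc _ _
  unfold Spec_get_holds_used
  exact ports_eq holds dc
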